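-- pv_equiv track=rewrite | github.com/AngleNet/atropos | features/plotTrendingIndex.py | double
-- ===== SOURCE A (Python) =====
-- def double(x, pos, width):
--     _x = list()
--     _pos = list()
--     for idx in range(0, len(x)):
--         if idx % 2 == 0:
--             _x.append(x[idx])
--             if len(x) - 1 == idx:
--                 _pos.append(pos[idx])
--             else:
--                 _pos.append(pos[idx] + pos[idx+1])
--     return (_x, _pos, width*2)
-- ===== SOURCE B (Python) =====
-- def double(x, pos, width):
--     n = len(x)
--     p = pos[:n]
--     _pos = [a + b for a, b in zip(p[::2], p[1::2])]
--     if n % 2 == 1: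
--         _pos.append(pos[n - 1])
--     return (list(x[::2]), _pos, width * 2)
-- ===== Notes on version B (the rewrite author's own statement) =====
-- stated objective: idiomatic
-- what changed: Replaces the index loop with its even-parity guard and in-bounds test by direct strided slicing: x[::2] for the kept samples and an elementwise sum of the two strided halves pos[::2]/pos[1::2] (zip truncation handles the pairing), with the single unpaired trailing element appended only when len(x) is odd.
import Mathlib
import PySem

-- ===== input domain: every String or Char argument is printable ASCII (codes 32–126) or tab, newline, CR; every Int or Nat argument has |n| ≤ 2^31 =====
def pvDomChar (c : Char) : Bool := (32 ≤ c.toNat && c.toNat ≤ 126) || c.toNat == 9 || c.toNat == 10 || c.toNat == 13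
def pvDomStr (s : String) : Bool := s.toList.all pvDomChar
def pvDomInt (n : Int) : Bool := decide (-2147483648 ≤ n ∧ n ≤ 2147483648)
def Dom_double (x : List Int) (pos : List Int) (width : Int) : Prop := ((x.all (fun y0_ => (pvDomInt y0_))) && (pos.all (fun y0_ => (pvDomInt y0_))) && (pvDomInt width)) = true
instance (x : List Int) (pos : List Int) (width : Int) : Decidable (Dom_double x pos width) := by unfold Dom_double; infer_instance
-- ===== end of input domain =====

-- B replaces A's index loop (even-parity guard, bounds test) by strided slices x[::2], pos[::2], pos[1::2]
-- zipped and summed, appending the lone trailing element when len(x) is odd (objective: idiomatic).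


-- ===== PORT A =====
def double (x : List Int) (pos : List Int) (width : Int) : List Int × List Int × Int :=
  let st := (PySem.List.pyRange 0 (x.length : Int) 1).foldl
    (fun (acc : List Int × List Int) idx =>
      if PySem.Int.mod idx 2 == 0 then
        (acc.1 ++ [PySem.List.pyGetD x idx 0],
         acc.2 ++ [if (x.length : Int) - 1 == idx then PySem.List.pyGetD pos idx 0
                   else PySem.List.pyGetD pos idx 0 + PySem.List.pyGetD pos (idx + 1) 0])
      else acc) ([], [])
  (st.1, st.2, width * 2)

-- ===== PORT B =====
def double_alt (x : List Int) (pos : List Int) (width : Int) : List Int × List Int × Int :=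
  let n : Int := (x.length : Int)
  let p := PySem.List.slice pos none (some n)
  let ps0 := (((PySem.List.slice? p none none 2).getD []).zip
              ((PySem.List.slice? p (some 1) none 2).getD [])).map (fun ab => ab.1 + ab.2)
  let ps := if PySem.Int.mod n 2 == 1 then ps0 ++ [PySem.List.pyGetD pos (n - 1) 0] else ps0
  ((PySem.List.slice? x none none 2).getD [], ps, width * 2)

-- ===== PRECONDITION & SPEC =====
-- A indexes pos at every even index below len(x) (and one past it); pos shorter than x raises IndexError.
def Pre_double (x : List Int) (pos : List Int) (width : Int) : Prop := x.length ≤ pos.length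
instance (x : List Int) (pos : List Int) (width : Int) : Decidable (Pre_double x pos width) := by unfold Pre_double; infer_instance
def pvWitness_double : List Int × List Int × Int := ([1, 2, 3], [4, 5, 6], 7)

def Spec_double (x : List Int) (pos : List Int) (width : Int) (out : List Int × List Int × Int) : Prop := out = double_alt x pos width
instance (x : List Int) (pos : List Int) (width : Int) (out : List Int × List Int × Int) : Decidable (Spec_double x pos width out) := by unfold Spec_double; infer_instance

-- ===== CLAIM (what is proved, stated in full; the proofs are below) =====
def Claim_equal_double : Prop := ∀ (x : List Int) (pos : List Int) (width : Int), Dom_double x pos width → Pre_double x pos width → Spec_double x pos width (double x pos width)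

-- ===== LEMMAS AND PROOFS =====

-- Reference recursion both ports are reduced to: peel two elements of x (and of pos) per step.
def pvGo : List Int → List Int → List Int × List Int
  | [], _ => ([], [])
  | [a], ps => ([a], [ps.headD 0])
  | a :: _ :: xs, ps =>
      let r := pvGo xs (ps.drop 2)
      (a :: r.1, (ps.headD 0 + ps.tail.headD 0) :: r.2)

-- even indices below n
def pvEvens (n : Nat) : List Nat := (List.range n).filter (fun k => k % 2 == 0)

lemma pvEvens_two (m : Nat) : pvEvens (m + 1 + 1) = 0 :: (pvEvens m).map (· + 2) := by
  unfold pvEvens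
  rw [List.range_succ_eq_map, List.range_succ_eq_map]
  simp [List.filter_map, List.map_map, Function.comp_def, Nat.succ_eq_add_one]
  have h : ∀ k : Nat, ((k + 1 + 1) % 2 == 0) = (k % 2 == 0) := by
    intro k
    have : (k + 1 + 1) % 2 = k % 2 := by omega
    rw [this]
  have h2 : (fun k : Nat => k + 1 + 1) = (fun k : Nat => k + 2) := by funext k; omega
  rw [List.filter_congr (fun k _ => h k), h2]

-- E/O recursions for the strided slices
def pvE (xs : List Int) : List Int := (PySem.List.slice? xs none none 2).getD []
def pvO (xs : List Int) : List Int := (PySem.List.slice? xs (some 1) none 2).getD []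

lemma pvE_nil : pvE [] = [] := by decide
lemma pvE_one (a : Int) : pvE [a] = [a] := by
  simp [pvE, PySem.List.slice?, PySem.List.sliceIndices]
lemma pvE_cons2 (a b : Int) (xs : List Int) : pvE (a :: b :: xs) = a :: pvE xs := by
  simp [pvE, PySem.List.slice?, PySem.List.sliceIndices]
  have h1 : ((↑xs.length + 1 + 1 + 2 - 1 : ℤ) / 2).toNat = (xs.length + 1) / 2 + 1 := by omega
  have h2 : (if 0 < xs.length then (((xs.length : ℤ) + 2 - 1) / 2).toNat else 0) = (xs.length + 1) / 2 := by
    split <;> omega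
  have h3 : (0 : ℤ) ≤ ↑xs.length + 1 := by omega
  rw [h1, h2, if_pos h3, List.range_succ_eq_map]
  simp only [List.filterMap_cons, List.filterMap_map]
  norm_num
  refine List.filterMap_congr ?_
  intro k _
  have hk : (2 * ((k : ℤ) + 1)).toNat = 2 * k + 2 := by omega
  have hk2 : (2 * (k : ℤ)).toNat = 2 * k := by omega
  simp [hk, hk2]

lemma pvO_nil : pvO [] = [] := by decide
lemma pvO_one (a : Int) : pvO [a] = [] := by
  simp [pvO, PySem.List.slice?, PySem.List.sliceIndices]
lemma pvO_cons2 (a b : Int) (xs : List Int) : pvO (a :: b :: xs) = b :: pvO xs := by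
  by_cases hm : xs = []
  · subst hm; simp [pvO, PySem.List.slice?, PySem.List.sliceIndices]
  · have h0 : 1 ≤ xs.length := by
      cases xs with | nil => simp at hm | cons c ys => simp
    simp [pvO, PySem.List.slice?, PySem.List.sliceIndices]
    have hmin1 : min (1 : ℤ) (↑xs.length + 1 + 1) = 1 := by omega
    have hmin2 : min (1 : ℤ) (↑xs.length : ℤ) = 1 := by omega
    rw [hmin1, hmin2]
    have h1 : ((↑xs.length + 1 + 1 - 1 + 2 - 1 : ℤ) / 2).toNat = xs.length / 2 + 1 := by omega
    have h2 : (if 1 < xs.length then (((xs.length : ℤ) - 1 + 2 - 1) / 2).toNat else 0) = xs.length / 2 := by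
      split <;> omega
    rw [h1, h2, List.range_succ_eq_map]
    simp only [List.filterMap_cons, List.filterMap_map]
    norm_num
    refine List.filterMap_congr ?_
    intro k _
    have hk : (1 + 2 * ((k : ℤ) + 1)).toNat = (1 + 2 * k) + 2 := by omega
    have hk2 : (1 + 2 * (k : ℤ)).toNat = 1 + 2 * k := by omega
    simp [hk, hk2]

-- A's loop result as maps over the even indices
lemma pv_double_eq_maps (x pos : List Int) (width : Int) :
    double x pos width = ((pvEvens x.length).map (fun k => x.getD k 0),
      (pvEvens x.length).map (fun (k : Nat) => if (x.length : ℤ) - 1 = (k : ℤ) then pos.getD k 0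
        else pos.getD k 0 + pos.getD (k + 1) 0),
      width * 2) := by
  unfold double
  have hfun : (fun (acc : List Int × List Int) (idx : Int) =>
      if PySem.Int.mod idx 2 == 0 then
        (acc.1 ++ [PySem.List.pyGetD x idx 0],
         acc.2 ++ [if (x.length : Int) - 1 == idx then PySem.List.pyGetD pos idx 0
                   else PySem.List.pyGetD pos idx 0 + PySem.List.pyGetD pos (idx + 1) 0])
      else acc)
    = (fun (acc : List Int × List Int) (idx : Int) =>
      ((if PySem.Int.mod idx 2 == 0 then acc.1 ++ [PySem.List.pyGetD x idx 0] else acc.1),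
       (if PySem.Int.mod idx 2 == 0 then acc.2 ++ [if (x.length : Int) - 1 == idx then PySem.List.pyGetD pos idx 0
                   else PySem.List.pyGetD pos idx 0 + PySem.List.pyGetD pos (idx + 1) 0] else acc.2))) := by
    funext acc idx
    split <;> simp
  dsimp only
  rw [hfun, PySem.List.foldl_prod_mk
        (fun l idx => if PySem.Int.mod idx 2 == 0 then l ++ [PySem.List.pyGetD x idx 0] else l)
        (fun l idx => if PySem.Int.mod idx 2 == 0 then l ++ [if (x.length : Int) - 1 == idx then PySem.List.pyGetD pos idx 0
                   else PySem.List.pyGetD pos idx 0 + PySem.List.pyGetD pos (idx + 1) 0] else l),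
      PySem.List.foldl_append_if, PySem.List.foldl_append_if]
  rw [PySem.List.pyRange_zero_nat, List.filter_map, List.map_map, List.map_map]
  have hp : ∀ k : Nat, ((fun idx : Int => PySem.Int.mod idx 2 == 0) ∘ (fun k : Nat => (k : Int))) k = (k % 2 == 0) := by
    intro k; simp; omega
  rw [List.filter_congr (fun k _ => hp k)]
  unfold pvEvens
  simp only [List.nil_append, Prod.mk.injEq]
  refine ⟨?_, ?_, trivial⟩
  · refine List.map_congr_left ?_
    intro k _
    simp [PySem.List.pyGetD_natCast]
  · refine List.map_congr_left ?_
    intro k _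
    have : ((k : Int) + 1) = ((k + 1 : Nat) : Int) := by push_cast; ring
    simp only [Function.comp_apply]
    rw [this, PySem.List.pyGetD_natCast, PySem.List.pyGetD_natCast]
    simp [beq_iff_eq]

lemma pv_getD_zero (ps : List Int) : ps.getD 0 0 = ps.headD 0 := by
  cases ps <;> simp

lemma pv_getD_one (ps : List Int) : ps.getD 1 0 = ps.tail.headD 0 := by
  cases ps with
  | nil => simp
  | cons p ps' => cases ps' <;> simp

lemma pv_map1_go (x ps : List Int) :
    (pvEvens x.length).map (fun k => x.getD k 0) = (pvGo x ps).1 := by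
  induction x, ps using pvGo.induct with
  | case1 ps => simp [pvEvens, pvGo]
  | case2 a ps => simp [pvEvens, pvGo, List.range_succ]
  | case3 a b xs ps ih =>
    simp only [List.length_cons]
    rw [pvEvens_two]
    simp only [List.map_cons, List.map_map, pvGo]
    refine congrArg₂ _ rfl ?_
    rw [← ih]
    refine List.map_congr_left ?_
    intro k _
    simp [Function.comp_apply]

lemma pv_map2_go (x ps : List Int) :
    (pvEvens x.length).map (fun (k : Nat) => if (x.length : ℤ) - 1 = (k : ℤ) then ps.getD k 0
      else ps.getD k 0 + ps.getD (k + 1) 0) = (pvGo x ps).2 := by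
  induction x, ps using pvGo.induct with
  | case1 ps => simp [pvEvens, pvGo]
  | case2 a ps =>
    simp [pvEvens, pvGo, List.range_succ]
    cases ps <;> simp
  | case3 a b xs ps ih =>
    simp only [List.length_cons]
    rw [pvEvens_two]
    simp only [List.map_cons, List.map_map, pvGo]
    refine congrArg₂ _ ?_ ?_
    · rw [if_neg (by push_cast; omega : ¬ (((xs.length + 1 + 1 : Nat) : ℤ) - 1 = ((0 : Nat) : ℤ)))]
      rw [pv_getD_zero, pv_getD_one]
    · rw [← ih]
      refine List.map_congr_left ?_
      intro k _
      simp only [Function.comp_apply]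
      have hcond : ((xs.length + 1 + 1 : Nat) : ℤ) - 1 = ((k + 2 : Nat) : ℤ) ↔ (xs.length : ℤ) - 1 = (k : ℤ) := by
        push_cast; omega
      have hgd : ∀ j : Nat, ps.getD (j + 2) 0 = (ps.drop 2).getD j 0 := by
        intro j
        rw [List.getD_eq_getElem?_getD, List.getD_eq_getElem?_getD, List.getElem?_drop,
          show 2 + j = j + 2 from by omega]
      rw [hgd k, show k + 2 + 1 = (k + 1) + 2 from rfl, hgd (k + 1)]
      exact if_congr hcond rfl rfl

lemma double_char (x pos : List Int) (width : Int) :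
    double x pos width = ((pvGo x pos).1, (pvGo x pos).2, width * 2) := by
  rw [pv_double_eq_maps, pv_map1_go x pos, pv_map2_go x pos]

lemma pvE_def (xs : List Int) : (PySem.List.slice? xs none none 2).getD [] = pvE xs := rfl
lemma pvO_def (xs : List Int) : (PySem.List.slice? xs (some 1) none 2).getD [] = pvO xs := rfl

lemma pv_go1 (x ps : List Int) : (pvGo x ps).1 = pvE x := by
  induction x, ps using pvGo.induct with
  | case1 ps => rw [pvE_nil]; rfl
  | case2 a ps => rw [pvE_one]; rfl
  | case3 a b xs ps ih => rw [pvE_cons2]; simpa [pvGo] using ih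

lemma pv_mod2 (n : Nat) : (PySem.Int.mod ((n : Nat) : ℤ) 2 == 1) = (n % 2 == 1) := by
  rw [PySem.Int.mod_eq_emod_of_pos (by norm_num)]
  by_cases h : n % 2 = 1
  · simp [h]; omega
  · simp [h]; omega

lemma pv_alt2 (x ps : List Int) (h : x.length ≤ ps.length) :
    (if PySem.Int.mod (x.length : ℤ) 2 == 1
     then ((pvE (ps.take x.length)).zip (pvO (ps.take x.length))).map (fun ab => ab.1 + ab.2)
            ++ [PySem.List.pyGetD ps ((x.length : ℤ) - 1) 0]
     else ((pvE (ps.take x.length)).zip (pvO (ps.take x.length))).map (fun ab => ab.1 + ab.2))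
      = (pvGo x ps).2 := by
  induction x, ps using pvGo.induct with
  | case1 ps => simp [pvGo, pvE_nil, pvO_nil]
  | case2 a ps =>
    cases ps with
    | nil => simp at h
    | cons p ps' =>
      simp only [List.length_singleton, List.take_succ_cons, List.take_zero]
      rw [pvE_one, pvO_one]
      rw [pv_mod2, if_pos (by decide)]
      simp [pvGo, PySem.List.pyGetD_zero_cons]
  | case3 a b xs ps ih =>
    cases ps with
    | nil => simp at h
    | cons p ps0 =>
      cases ps0 with
      | nil => simp at h
      | cons q ps' =>
        have h' : xs.length ≤ ps'.length := by simp at h; omega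
        have ih' := ih (by simpa using h')
        simp only [show List.drop 2 (p :: q :: ps') = ps' from rfl] at ih'
        rw [pv_mod2] at ih' 
        simp only [List.length_cons, List.take_succ_cons]
        rw [pvE_cons2, pvO_cons2]
        simp only [List.zip_cons_cons, List.map_cons]
        rw [pv_mod2, show (xs.length + 1 + 1) % 2 = xs.length % 2 from by omega]
        by_cases hodd : xs.length % 2 == 1
        · have hm1 : 1 ≤ xs.length := by simp at hodd; omega
          rw [if_pos hodd]
          have hidx : ((xs.length + 1 + 1 : Nat) : ℤ) - 1 = ((xs.length + 1 : Nat) : ℤ) := by push_cast; ring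
          have hidx2 : ((xs.length : Nat) : ℤ) - 1 = ((xs.length - 1 : Nat) : ℤ) := by
            push_cast [hm1]; omega
          rw [hidx, PySem.List.pyGetD_natCast]
          have hg : (p :: q :: ps').getD (xs.length + 1) 0 = ps'.getD (xs.length - 1) 0 := by
            rw [show xs.length + 1 = (xs.length - 1) + 2 from by omega]
            simp
          rw [if_pos hodd, hidx2, PySem.List.pyGetD_natCast] at ih'
          rw [hg]
          simp only [List.cons_append]
          rw [ih']
          simp [pvGo]
        · rw [if_neg hodd] at ih'
          rw [if_neg hodd, ih']
          simp [pvGo]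

lemma double_alt_char (x pos : List Int) (width : Int) (h : x.length ≤ pos.length) :
    double_alt x pos width = ((pvGo x pos).1, (pvGo x pos).2, width * 2) := by
  unfold double_alt
  dsimp only
  rw [PySem.List.slice_to_natCast]
  simp only [pvE_def, pvO_def]
  rw [pv_go1 x pos, pv_alt2 x pos h]

-- ===== VERDICT (by name: the statement is the Claim_ definition above) =====
theorem double_spec : Claim_equal_double := by
  intro x pos width _ hpre
  unfold Spec_double
  rw [double_char x pos width, double_alt_char x pos width hpre]
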